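-- pv_equiv track=rewrite | github.com/JosephJuska/Encryptor | Encrypt/Encrypt_pack.py | rotation_and_key_letters
-- ===== SOURCE A (Python) =====
-- from string import ascii_letters
--
-- d1_letters = {y:x for x,y in enumerate(sorted(ascii_letters))}
--
-- d2_letters = {x:y for x,y in enumerate(sorted(ascii_letters))}
--
-- def rotation_and_key_letters(rotation_number: int,key: str,text: str) -> str:
--     '''
--     Function to encrypt text when rotation number and key both are included.
--     If key is long enough,rotation will not be used.
--     Encryption is done only by letters.
--     '''
--     new_text = ''
--     j = 0
--     for i in text:
--         if j >= len(key):
--             n = d1_letters[i]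
--             n += rotation_number
--             if n > 51:
--                 n %= 52
--
--             new_text += d2_letters[n]
--             continue
--
--         n = d1_letters[i]
--         m = d1_letters[key[j]]
--         n += m
--         if n > 51:
--             n %= 52
--
--         new_text += d2_letters[n]
--         j += 1
--     return new_text
-- ===== SOURCE B (Python) =====
-- from string import ascii_letters
--
-- d1_letters = {y:x for x,y in enumerate(sorted(ascii_letters))}
--
-- d2_letters = {x:y for x,y in enumerate(sorted(ascii_letters))}
--
-- def rotation_and_key_letters(rotation_number: int, key: str, text: str) -> str:
--     '''Two-phase rewrite: key-shifted prefix, rotation-shifted tail, joined.'''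
--     part1 = []
--     for kc, tc in zip(key, text):
--         n = d1_letters[tc] + d1_letters[kc]
--         if n > 51:
--             n %= 52
--         part1.append(d2_letters[n])
--     part2 = []
--     for tc in text[len(key):]:
--         n = d1_letters[tc] + rotation_number
--         if n > 51:
--             n %= 52
--         part2.append(d2_letters[n])
--     return ''.join(part1) + ''.join(part2)
-- ===== Notes on version B (the rewrite author's own statement) =====
-- stated objective: simpler
-- what changed: Replaces A's single branchy loop with a manual j counter by two explicit phases (zip over key+text, then the tail beyond the key) whose pieces are joined.
import Mathlib
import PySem

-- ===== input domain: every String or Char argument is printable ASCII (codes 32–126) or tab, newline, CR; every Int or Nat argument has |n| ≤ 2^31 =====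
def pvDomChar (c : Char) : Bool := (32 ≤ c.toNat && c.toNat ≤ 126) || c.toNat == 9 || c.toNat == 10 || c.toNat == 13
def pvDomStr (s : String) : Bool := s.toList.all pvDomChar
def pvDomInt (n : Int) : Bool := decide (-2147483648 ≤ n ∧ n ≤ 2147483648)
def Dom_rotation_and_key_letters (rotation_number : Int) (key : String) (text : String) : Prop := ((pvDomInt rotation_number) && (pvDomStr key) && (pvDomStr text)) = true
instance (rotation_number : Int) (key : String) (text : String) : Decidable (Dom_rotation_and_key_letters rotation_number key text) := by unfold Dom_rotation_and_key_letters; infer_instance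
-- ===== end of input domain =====

-- B builds the output in two explicit phases (key-zipped prefix, rotation tail) instead of A's one loop with a manual j counter; objective: simpler.

-- ===== PORT A =====
-- module constant: ascii_letters
def pvAsciiLetters : List Char := "abcdefghijklmnopqrstuvwxyzABCDEFGHIJKLMNOPQRSTUVWXYZ".toList
-- d1_letters = {y:x for x,y in enumerate(sorted(ascii_letters))}
def pvD1 : PySem.Dict Char Int :=
  PySem.Dict.ofList ((PySem.List.enumerate (PySem.List.sorted pvAsciiLetters (fun c => c) false)).map (fun p => (p.2, p.1)))
-- d2_letters = {x:y for x,y in enumerate(sorted(ascii_letters))}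
def pvD2 : PySem.Dict Int Char :=
  PySem.Dict.ofList (PySem.List.enumerate (PySem.List.sorted pvAsciiLetters (fun c => c) false))

-- A's single loop over text with the manual counter j (dict lookups use .getD; Pre_ excludes the KeyError inputs)
def pvLoopA (rot : Int) (kl : List Char) (tl : List Char) (j : Nat) (acc : List Char) : List Char :=
  match tl with
  | [] => acc
  | c :: rest =>
    if j ≥ kl.length then
      let n := (pvD1.get? c).getD 0 + rot
      let n := if n > 51 then PySem.Int.mod n 52 else n
      pvLoopA rot kl rest j (acc ++ [(pvD2.get? n).getD 'a'])
    else
      let n := (pvD1.get? c).getD 0 + (pvD1.get? ((PySem.List.pyGet? kl (j : Int)).getD 'a')).getD 0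
      let n := if n > 51 then PySem.Int.mod n 52 else n
      pvLoopA rot kl rest (j + 1) (acc ++ [(pvD2.get? n).getD 'a'])

def rotation_and_key_letters (rotation_number : Int) (key : String) (text : String) : String :=
  String.mk (pvLoopA rotation_number key.toList text.toList 0 [])

-- ===== PORT B =====
-- per-character encodings of Source B's two loops
def pvEnc1 (kc tc : Char) : Char :=
  let n := (pvD1.get? tc).getD 0 + (pvD1.get? kc).getD 0
  (pvD2.get? (if n > 51 then PySem.Int.mod n 52 else n)).getD 'a'
def pvEnc2 (rot : Int) (tc : Char) : Char :=
  let n := (pvD1.get? tc).getD 0 + rot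
  (pvD2.get? (if n > 51 then PySem.Int.mod n 52 else n)).getD 'a'

-- text[len(key):] with a nonnegative bound is List.drop
def rotation_and_key_letters_alt (rotation_number : Int) (key : String) (text : String) : String :=
  let kl := key.toList
  let tl := text.toList
  String.mk ((kl.zip tl).map (fun p => pvEnc1 p.1 p.2) ++ (tl.drop kl.length).map (pvEnc2 rotation_number))

-- ===== PRECONDITION & SPEC =====
-- closed-form letter test and index ('A'..'Z' → 0..25, 'a'..'z' → 26..51), used only to state Pre_
def pvIsLetter (c : Char) : Bool := (65 ≤ c.toNat && c.toNat ≤ 90) || (97 ≤ c.toNat && c.toNat ≤ 122)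
def pvIdx (c : Char) : Int := if 97 ≤ c.toNat then (c.toNat : Int) - 71 else (c.toNat : Int) - 65
-- Pre_ = exactly the inputs where the Python returns: every used character is an ASCII letter
-- and every tail character's shifted index is nonnegative (otherwise d1/d2 raise KeyError).
def Pre_rotation_and_key_letters (rotation_number : Int) (key : String) (text : String) : Prop :=
  (text.toList.all pvIsLetter
    && (key.toList.take text.toList.length).all pvIsLetter
    && (text.toList.drop key.toList.length).all (fun c => decide (0 ≤ pvIdx c + rotation_number))) = true
instance (rotation_number : Int) (key : String) (text : String) : Decidable (Pre_rotation_and_key_letters rotation_number key text) := by unfold Pre_rotation_and_key_letters; infer_instance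

def pvWitness_rotation_and_key_letters : Int × String × String := (3, "ab", "Hello")

def Spec_rotation_and_key_letters (rotation_number : Int) (key : String) (text : String) (out : String) : Prop := out = rotation_and_key_letters_alt rotation_number key text
instance (rotation_number : Int) (key : String) (text : String) (out : String) : Decidable (Spec_rotation_and_key_letters rotation_number key text out) := by unfold Spec_rotation_and_key_letters; infer_instance

-- ===== CLAIM (what is proved, stated in full; the proofs are below) =====
def Claim_equal_rotation_and_key_letters : Prop := ∀ (rotation_number : Int) (key : String) (text : String), Dom_rotation_and_key_letters rotation_number key text → Pre_rotation_and_key_letters rotation_number key text → Spec_rotation_and_key_letters rotation_number key text (rotation_and_key_letters rotation_number key text)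

-- ===== LEMMAS AND PROOFS =====

lemma pvLoopA_eq (rot : Int) (kl : List Char) :
    ∀ (tl : List Char) (j : Nat) (acc : List Char), j ≤ kl.length →
      pvLoopA rot kl tl j acc =
        acc ++ ((kl.drop j).zip tl).map (fun p => pvEnc1 p.1 p.2)
            ++ (tl.drop (kl.length - j)).map (pvEnc2 rot) := by
  intro tl
  induction tl with
  | nil => intro j acc _; simp [pvLoopA]
  | cons c rest ih =>
    intro j acc hj
    by_cases h : j ≥ kl.length
    · have hje : j = kl.length := le_antisymm hj h
      rw [pvLoopA]
      simp only [h, if_pos]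
      rw [ih j _ hj]
      subst hje
      simp [pvEnc2, List.append_assoc]
    · have hlt : j < kl.length := lt_of_not_ge h
      have hget : PySem.List.pyGet? kl (j : Int) = some kl[j] := by
        simp [PySem.List.pyGet?_natCast, List.getElem?_eq_getElem hlt]
      have hsub : kl.length - j = (kl.length - (j + 1)) + 1 := by omega
      rw [pvLoopA, if_neg h, hget, ih (j + 1) _ hlt, List.drop_eq_getElem_cons hlt,
          List.zip_cons_cons, List.map_cons, hsub, List.drop_succ_cons]
      simp [pvEnc1, List.append_assoc]

-- ===== VERDICT (by name: the statement is the Claim_ definition above) =====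
theorem rotation_and_key_letters_spec : Claim_equal_rotation_and_key_letters := by
  intro rot key text _ _
  unfold Spec_rotation_and_key_letters rotation_and_key_letters rotation_and_key_letters_alt
  rw [pvLoopA_eq rot key.toList text.toList 0 [] (Nat.zero_le _)]
  simp
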